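-- pv_equiv track=rewrite | github.com/WilkarMarquez/implementaciones-n-queens | gen/genetic_algorithm.py | foundSolution
-- ===== SOURCE A (Python) =====
-- def heuristica(board):
--     row = 0
--     dia = 0
--     for i in range(0,len(board)):
--         for j in range(i+1,len(board)):
--             if i != j:
--                 x = abs(i-j)
--                 y = abs(board[i]-board[j])
--                 if x == y:
--                     dia += 1
--             if board[i]==board[j]:
--                 row += 1
--
--     return row + dia
--
-- def foundSolution(population):
--     menor = heuristica(population[0])
--     bestIndividual = population[0]
--     for individual in population:
--         if heuristica(individual) <= menor:
--             bestIndividual = individual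
--             menor = heuristica(individual)
--         if heuristica(individual) == 0:
--             return (True, individual)
--
--     return (False,bestIndividual)
-- ===== SOURCE B (Python) =====
-- def foundSolution(population):
--     # O(n) heuristic per board: count queens per row and per diagonal,
--     # each group of k equal keys contributes k*(k-1)//2 conflicting pairs.
--     def heuristic(board):
--         rows, diag1, diag2 = {}, {}, {}
--         for i, v in enumerate(board):
--             rows[v] = rows.get(v, 0) + 1
--             diag1[v - i] = diag1.get(v - i, 0) + 1
--             diag2[v + i] = diag2.get(v + i, 0) + 1
--         total = 0
--         for table in (rows, diag1, diag2):
--             for k in table.values():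
--                 total += k * (k - 1) // 2
--         return total
--
--     menor = None
--     best = None
--     for individual in population:
--         h = heuristic(individual)
--         if h == 0:
--             return (True, individual)
--         if menor is None or h <= menor:
--             best, menor = individual, h
--     return (False, best)
-- ===== Notes on version B (the rewrite author's own statement) =====
-- stated objective: faster
-- what changed: The heuristic is computed once per individual in O(n) with row/diagonal frequency tables (each group of k equal keys contributes k*(k-1)//2 conflicts) instead of A's O(n^2) all-pairs double loop called up to three times per individual; the scan then returns the first zero-heuristic individual or the last minimizer. Pre_ only excludes the empty population, on which A raises IndexError.
import Mathlib
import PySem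

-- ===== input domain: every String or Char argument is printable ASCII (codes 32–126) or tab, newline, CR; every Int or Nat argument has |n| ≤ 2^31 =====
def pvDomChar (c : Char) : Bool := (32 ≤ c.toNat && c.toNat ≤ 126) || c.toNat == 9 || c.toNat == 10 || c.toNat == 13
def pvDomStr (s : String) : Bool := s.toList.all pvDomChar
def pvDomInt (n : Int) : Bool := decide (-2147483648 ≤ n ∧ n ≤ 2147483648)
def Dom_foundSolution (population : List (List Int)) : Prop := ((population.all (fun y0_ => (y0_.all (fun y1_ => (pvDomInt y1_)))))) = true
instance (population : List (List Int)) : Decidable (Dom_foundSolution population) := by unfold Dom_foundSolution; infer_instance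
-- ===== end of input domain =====

-- B replaces A's all-pairs conflict count (run three times per individual) by one pass per
-- individual over row/diagonal frequency tables, summing k*(k-1)//2 per group of equal keys.

-- ===== PORT A =====
-- inner 'for j in range(i+1, len(board))' loop of heuristica
def heuInner (board : List Int) (n i : Int) (s0 : Int × Int) : Int × Int :=
  (PySem.List.pyRange (i + 1) n).foldl (fun (s : Int × Int) (j : Int) =>
    let s : Int × Int :=
      if i ≠ j then
        if |i - j| = |PySem.List.pyGetD board i 0 - PySem.List.pyGetD board j 0| then
          (s.1, s.2 + 1)
        else s
      else s
    if PySem.List.pyGetD board i 0 = PySem.List.pyGetD board j 0 then (s.1 + 1, s.2) else s)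
    s0

def heuristica (board : List Int) : Int :=
  let n : Int := PySem.List.len board
  let rd : Int × Int :=
    (PySem.List.pyRange 0 n).foldl (fun (s : Int × Int) (i : Int) => heuInner board n i s) (0, 0)
  rd.1 + rd.2

def foundLoop (menor : Int) (best : List Int) : List (List Int) → Bool × List Int
  | [] => (false, best)
  | ind :: rest =>
    let p : List Int × Int := if heuristica ind ≤ menor then (ind, heuristica ind) else (best, menor)
    if heuristica ind = 0 then (true, ind)
    else foundLoop p.2 p.1 rest

def foundSolution (population : List (List Int)) : Bool × List Int :=
  match population with
  | [] => (false, [])  -- Python raises IndexError on population[0]; excluded by Pre_foundSolution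
  | first :: _ => foundLoop (heuristica first) first population

-- ===== PORT B =====
def heuristicAlt (board : List Int) : Int :=
  let tables : PySem.Dict Int Int × PySem.Dict Int Int × PySem.Dict Int Int :=
    (PySem.List.enumerate board).foldl
      (fun (s : PySem.Dict Int Int × PySem.Dict Int Int × PySem.Dict Int Int) (p : Int × Int) =>
        (s.1.insert p.2 (s.1.getD p.2 0 + 1),
         s.2.1.insert (p.2 - p.1) (s.2.1.getD (p.2 - p.1) 0 + 1),
         s.2.2.insert (p.2 + p.1) (s.2.2.getD (p.2 + p.1) 0 + 1)))
      (PySem.Dict.empty, PySem.Dict.empty, PySem.Dict.empty)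
  (tables.1.values ++ tables.2.1.values ++ tables.2.2.values).foldl
    (fun total k => total + PySem.Int.floordiv (k * (k - 1)) 2) 0

def foundAltLoop (menorBest : Option (Int × List Int)) : List (List Int) → Bool × List Int
  | [] => (false, (menorBest.map (·.2)).getD [])  -- Python B returns (False, None) here when menorBest is none; that is reachable only for the empty population, excluded by Pre_foundSolution
  | ind :: rest =>
    let h := heuristicAlt ind
    if h = 0 then (true, ind)
    else
      match menorBest with
      | none => foundAltLoop (some (h, ind)) rest
      | some (menor, best) =>
        if h ≤ menor then foundAltLoop (some (h, ind)) rest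
        else foundAltLoop (some (menor, best)) rest

def foundSolution_alt (population : List (List Int)) : Bool × List Int :=
  foundAltLoop none population

-- ===== PRECONDITION & SPEC =====
-- Pre_ excludes exactly the empty population, on which Python A raises IndexError at population[0].
def Pre_foundSolution (population : List (List Int)) : Prop := population ≠ []
instance (population : List (List Int)) : Decidable (Pre_foundSolution population) := by
  unfold Pre_foundSolution; infer_instance

def pvWitness_foundSolution : List (List Int) := [[1, 3, 0, 2]]

def Spec_foundSolution (population : List (List Int)) (out : Bool × List Int) : Prop :=
  out = foundSolution_alt population
instance (population : List (List Int)) (out : Bool × List Int) : Decidable (Spec_foundSolution population out) := by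
  unfold Spec_foundSolution; infer_instance

-- ===== CLAIM (what is proved, stated in full; the proofs are below) =====
def Claim_equal_foundSolution : Prop :=
  ∀ (population : List (List Int)), Dom_foundSolution population →
    Pre_foundSolution population → Spec_foundSolution population (foundSolution population)

-- ===== LEMMAS AND PROOFS =====

-- pc l = number of unordered pairs of equal entries of l (head counts its matches in the tail)
def pc : List Int → Int
  | [] => 0
  | x :: t => (t.count x : Int) + pc t

-- the "v - i" diagonal keys of a board, indices starting at c
def diagA : Int → List Int → List Int
  | _, [] => []
  | c, x :: t => (x - c) :: diagA (c + 1) t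

-- the "v + i" diagonal keys of a board, indices starting at c
def diagB : Int → List Int → List Int
  | _, [] => []
  | c, x :: t => (x + c) :: diagB (c + 1) t

-- what B sums for one frequency table: sum over distinct keys of count*(count-1)/2
def sumC2 (xs : List Int) : Int :=
  ((PySem.Set.ofList xs).map (fun k => (↑(xs.count k * (xs.count k - 1) / 2) : Int))).sum

-- A's double loop, normalised to sums over List.range
def rsRow (t : List Int) : Int :=
  ((List.range t.length).map (fun i =>
    ((List.range (t.length - 1 - i)).map (fun k =>
      if t.getD i 0 = t.getD (i + 1 + k) 0 then (1 : Int) else 0)).sum)).sum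

def rsDia (t : List Int) : Int :=
  ((List.range t.length).map (fun i =>
    ((List.range (t.length - 1 - i)).map (fun (k : Nat) =>
      if ((k : Int) + 1) = |t.getD i 0 - t.getD (i + 1 + k) 0| then (1 : Int) else 0)).sum)).sum

-- per-pair contributions of A's inner loop body
def cRow (board : List Int) (i j : Int) : Int :=
  if PySem.List.pyGetD board i 0 = PySem.List.pyGetD board j 0 then 1 else 0
def cDia (board : List Int) (i j : Int) : Int :=
  if i ≠ j ∧ |i - j| = |PySem.List.pyGetD board i 0 - PySem.List.pyGetD board j 0| then 1 else 0

lemma sum_indicator_eq_count (x : Int) (s : List Int) :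
    ((List.range s.length).map (fun k => if x = s.getD k 0 then (1 : Int) else 0)).sum
      = (s.count x : Int) := by
  induction s with
  | nil => simp
  | cons y t ih =>
    simp only [List.length_cons, List.range_succ_eq_map, List.map_cons, List.map_map,
      List.sum_cons, List.count_cons]
    have h2 : (List.map ((fun k => if x = (y :: t).getD k 0 then (1:Int) else 0) ∘ Nat.succ)
        (List.range t.length)).sum = (t.count x : Int) := by
      simpa [Function.comp] using ih
    rw [h2]
    simp only [List.getD_cons_zero, beq_iff_eq]
    split_ifs with h <;> push_cast <;> simp [h, eq_comm] <;> omega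

lemma sum_indicator_eq_count' (x : Int) (l : List Int) :
    (l.map (fun v => if x = v then (1 : Int) else 0)).sum = (l.count x : Int) := by
  induction l with
  | nil => simp
  | cons y t ih =>
    simp only [List.map_cons, List.sum_cons, ih, List.count_cons, beq_iff_eq]
    split_ifs with h <;> push_cast <;> simp [h, eq_comm] <;> omega

lemma rsRow_cons (x : Int) (s : List Int) :
    rsRow (x :: s) = ((List.range s.length).map (fun k =>
      if x = s.getD k 0 then (1 : Int) else 0)).sum + rsRow s := by
  unfold rsRow
  simp only [List.length_cons, List.range_succ_eq_map, List.map_cons, List.sum_cons,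
    List.map_map, Nat.add_sub_cancel, Nat.sub_zero]
  congr 1
  · apply congrArg List.sum
    apply List.map_congr_left
    intro k _
    have h1 : 0 + 1 + k = k + 1 := by omega
    rw [h1]
    simp
  · apply congrArg List.sum
    apply List.map_congr_left
    intro i _
    apply congrArg List.sum
    have hr : s.length - (i + 1) = s.length - 1 - i := by omega
    simp only [Nat.succ_eq_add_one, hr]
    apply List.map_congr_left
    intro k _
    have h2 : i + 1 + 1 + k = (i + 1 + k) + 1 := by omega
    rw [h2]
    simp

lemma rsDia_cons (x : Int) (s : List Int) :
    rsDia (x :: s) = ((List.range s.length).map (fun (k : Nat) =>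
      if ((k : Int) + 1) = |x - s.getD k 0| then (1 : Int) else 0)).sum + rsDia s := by
  unfold rsDia
  simp only [List.length_cons, List.range_succ_eq_map, List.map_cons, List.sum_cons,
    List.map_map, Nat.add_sub_cancel, Nat.sub_zero]
  congr 1
  · apply congrArg List.sum
    apply List.map_congr_left
    intro k _
    have h1 : 0 + 1 + k = k + 1 := by omega
    rw [h1]
    simp
  · apply congrArg List.sum
    apply List.map_congr_left
    intro i _
    apply congrArg List.sum
    have hr : s.length - (i + 1) = s.length - 1 - i := by omega
    simp only [Nat.succ_eq_add_one, hr]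
    apply List.map_congr_left
    intro k _
    have h2 : i + 1 + 1 + k = (i + 1 + k) + 1 := by omega
    rw [h2]
    simp

lemma diagA_shift (t : List Int) : ∀ c, diagA c t = (diagA 0 t).map (fun v => v - c) := by
  induction t with
  | nil => intro c; simp [diagA]
  | cons x s ih =>
    intro c
    rw [diagA, diagA, ih (c + 1), ih (0 + 1), List.map_cons, List.map_map]
    congr 1
    · omega
    · apply List.map_congr_left; intro v _; simp; omega

lemma diagB_shift (t : List Int) : ∀ c, diagB c t = (diagB 0 t).map (fun v => v + c) := by
  induction t with
  | nil => intro c; simp [diagB]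
  | cons x s ih =>
    intro c
    rw [diagB, diagB, ih (c + 1), ih (0 + 1), List.map_cons, List.map_map]
    congr 1
    · omega
    · apply List.map_congr_left; intro v _; simp; omega

lemma count_map_sub (t : List Int) (c x : Int) :
    List.count (x - c) (t.map (fun v => v - c)) = t.count x := by
  have hinj : Function.Injective (fun v : Int => v - c) := by
    intro a b h; simp only at h; omega
  simpa using List.count_map_of_injective t (fun v : Int => v - c) hinj x

lemma count_map_add (t : List Int) (c x : Int) :
    List.count (x + c) (t.map (fun v => v + c)) = t.count x := by
  have hinj : Function.Injective (fun v : Int => v + c) := by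
    intro a b h; simp only at h; omega
  simpa using List.count_map_of_injective t (fun v : Int => v + c) hinj x

lemma pc_map_sub (l : List Int) (c : Int) : pc (l.map (fun v => v - c)) = pc l := by
  induction l with
  | nil => rfl
  | cons x t ih => simp only [List.map_cons, pc, ih, count_map_sub]

lemma pc_map_add (l : List Int) (c : Int) : pc (l.map (fun v => v + c)) = pc l := by
  induction l with
  | nil => rfl
  | cons x t ih => simp only [List.map_cons, pc, ih, count_map_add]

lemma map_getD_sub_range (s : List Int) : ∀ c,
    (List.range s.length).map (fun (k : Nat) => s.getD k 0 - ((k : Int) + c)) = diagA c s := by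
  induction s with
  | nil => intro c; simp [diagA]
  | cons x t ih =>
    intro c
    simp only [List.length_cons, List.range_succ_eq_map, List.map_cons, List.map_map, diagA]
    congr 1
    · simp
    · rw [← ih (c + 1)]
      apply List.map_congr_left; intro k _
      simp only [Function.comp_apply, Nat.succ_eq_add_one, List.getD_cons_succ]
      push_cast; ring

lemma map_getD_add_range (s : List Int) : ∀ c,
    (List.range s.length).map (fun (k : Nat) => s.getD k 0 + ((k : Int) + c)) = diagB c s := by
  induction s with
  | nil => intro c; simp [diagB]
  | cons x t ih =>
    intro c
    simp only [List.length_cons, List.range_succ_eq_map, List.map_cons, List.map_map, diagB]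
    congr 1
    · simp
    · rw [← ih (c + 1)]
      apply List.map_congr_left; intro k _
      simp only [Function.comp_apply, Nat.succ_eq_add_one, List.getD_cons_succ]
      push_cast; ring

lemma abs_indicator_split (d x v : Int) (hd : 0 < d) :
    (if d = |x - v| then (1 : Int) else 0)
      = (if x = v - d then (1 : Int) else 0) + (if x = v + d then (1 : Int) else 0) := by
  rcases abs_cases (x - v) with ⟨h1, h2⟩ | ⟨h1, h2⟩ <;> rw [h1] <;> split_ifs <;> omega

lemma rsRow_eq_pc (t : List Int) : rsRow t = pc t := by
  induction t with
  | nil => rfl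
  | cons x s ih =>
    rw [rsRow_cons, sum_indicator_eq_count, ih]
    rfl

lemma rsDia_eq_pc (t : List Int) : rsDia t = pc (diagA 0 t) + pc (diagB 0 t) := by
  induction t with
  | nil => rfl
  | cons x s ih =>
    rw [rsDia_cons, ih]
    have hsplit : ∀ k ∈ List.range s.length,
        (if ((k : Int) + 1) = |x - s.getD k 0| then (1 : Int) else 0)
          = (if x = s.getD k 0 - ((k : Int) + 1) then (1 : Int) else 0)
            + (if x = s.getD k 0 + ((k : Int) + 1) then (1 : Int) else 0) :=
      fun k _ => abs_indicator_split ((k : Int) + 1) x (s.getD k 0) (by positivity)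
    rw [List.map_congr_left hsplit, PySem.List.sum_map_add_int]
    have hA : ((List.range s.length).map (fun (k : Nat) =>
        if x = s.getD k 0 - ((k : Int) + 1) then (1 : Int) else 0)).sum
        = ((diagA 1 s).count x : Int) := by
      have hc : (fun (k : Nat) => if x = s.getD k 0 - ((k : Int) + 1) then (1 : Int) else 0)
          = (fun v => if x = v then (1 : Int) else 0)
            ∘ (fun (k : Nat) => s.getD k 0 - ((k : Int) + 1)) := rfl
      rw [hc, ← List.map_map, map_getD_sub_range s 1, sum_indicator_eq_count']
    have hB : ((List.range s.length).map (fun (k : Nat) =>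
        if x = s.getD k 0 + ((k : Int) + 1) then (1 : Int) else 0)).sum
        = ((diagB 1 s).count x : Int) := by
      have hc : (fun (k : Nat) => if x = s.getD k 0 + ((k : Int) + 1) then (1 : Int) else 0)
          = (fun v => if x = v then (1 : Int) else 0)
            ∘ (fun (k : Nat) => s.getD k 0 + ((k : Int) + 1)) := rfl
      rw [hc, ← List.map_map, map_getD_add_range s 1, sum_indicator_eq_count']
    rw [hA, hB]
    have hdA : diagA 0 (x :: s) = x :: diagA 1 s := by
      rw [diagA, sub_zero, zero_add]
    have hdB : diagB 0 (x :: s) = x :: diagB 1 s := by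
      rw [diagB, add_zero, zero_add]
    rw [hdA, hdB]
    show ↑((diagA 1 s).count x) + ↑((diagB 1 s).count x) + (pc (diagA 0 s) + pc (diagB 0 s))
      = (↑((diagA 1 s).count x) + pc (diagA 1 s)) + (↑((diagB 1 s).count x) + pc (diagB 1 s))
    rw [diagA_shift s 1, diagB_shift s 1, pc_map_sub, pc_map_add]
    ring

lemma foldl_pair_add (l : List Int) (f g : Int → Int) : ∀ (s : Int × Int),
    l.foldl (fun s j => (s.1 + f j, s.2 + g j)) s = (s.1 + (l.map f).sum, s.2 + (l.map g).sum) := by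
  induction l with
  | nil => intro s; simp
  | cons j r ih =>
    intro s
    simp only [List.foldl_cons, List.map_cons, List.sum_cons, ih]
    simp [Prod.ext_iff]
    constructor <;> ring

lemma inner_body_eq (board : List Int) (i : Int) :
    (fun (s : Int × Int) (j : Int) =>
        let s : Int × Int :=
          if i ≠ j then
            if |i - j| = |PySem.List.pyGetD board i 0 - PySem.List.pyGetD board j 0| then
              (s.1, s.2 + 1)
            else s
          else s
        if PySem.List.pyGetD board i 0 = PySem.List.pyGetD board j 0 then (s.1 + 1, s.2) else s)
    = (fun (s : Int × Int) (j : Int) => (s.1 + cRow board i j, s.2 + cDia board i j)) := by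
  funext s j
  simp only [cRow, cDia]
  split_ifs <;> simp_all <;> omega

lemma heuInner_eq (board : List Int) (n i : Int) (s0 : Int × Int) :
    heuInner board n i s0
      = (s0.1 + ((PySem.List.pyRange (i + 1) n).map (cRow board i)).sum,
         s0.2 + ((PySem.List.pyRange (i + 1) n).map (cDia board i)).sum) := by
  unfold heuInner
  rw [inner_body_eq board i, foldl_pair_add]

lemma frow_term_eq (board : List Int) (i : Nat) :
    ((PySem.List.pyRange ((0 + (i : Int)) + 1) ↑board.length).map (cRow board (0 + (i : Int)))).sum
      = ((List.range (board.length - 1 - i)).map (fun k =>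
          if board.getD i 0 = board.getD (i + 1 + k) 0 then (1 : Int) else 0)).sum := by
  rw [PySem.List.pyRange_one]
  have hn : ((board.length : Int) - (0 + (i : Int) + 1)).toNat = board.length - 1 - i := by omega
  rw [hn, List.map_map]
  apply congrArg List.sum
  apply List.map_congr_left
  intro k _
  simp only [Function.comp_apply, cRow]
  have h1 : (0 + (i : Int)) = ((i : Nat) : Int) := by omega
  have h2 : (0 + (i : Int) + 1 + (k : Int)) = (((i + 1 + k : Nat)) : Int) := by push_cast; ring
  rw [h2, h1, PySem.List.pyGetD_natCast, PySem.List.pyGetD_natCast]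

lemma fdia_term_eq (board : List Int) (i : Nat) :
    ((PySem.List.pyRange ((0 + (i : Int)) + 1) ↑board.length).map (cDia board (0 + (i : Int)))).sum
      = ((List.range (board.length - 1 - i)).map (fun (k : Nat) =>
          if ((k : Int) + 1) = |board.getD i 0 - board.getD (i + 1 + k) 0| then (1 : Int) else 0)).sum := by
  rw [PySem.List.pyRange_one]
  have hn : ((board.length : Int) - (0 + (i : Int) + 1)).toNat = board.length - 1 - i := by omega
  rw [hn, List.map_map]
  apply congrArg List.sum
  apply List.map_congr_left
  intro k _
  simp only [Function.comp_apply, cDia]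
  have h2 : (0 + (i : Int) + 1 + (k : Int)) = (((i + 1 + k : Nat)) : Int) := by push_cast; ring
  rw [h2]
  have hne : (0 + (i : Int)) ≠ (((i + 1 + k : Nat)) : Int) := by push_cast; omega
  have habs : |(0 + (i : Int)) - (((i + 1 + k : Nat)) : Int)| = (k : Int) + 1 := by
    have h3 : (0 + (i : Int)) - (((i + 1 + k : Nat)) : Int) = -((k : Int) + 1) := by
      push_cast; ring
    rw [h3, abs_neg, abs_of_nonneg (by positivity)]
  have h1 : (0 + (i : Int)) = ((i : Nat) : Int) := by omega
  rw [habs]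
  simp only [hne, ne_eq, not_false_eq_true, true_and]
  rw [h1, PySem.List.pyGetD_natCast, PySem.List.pyGetD_natCast]

lemma heuristica_eq_rs (board : List Int) : heuristica board = rsRow board + rsDia board := by
  unfold heuristica
  simp only [PySem.List.len]
  have houter : (fun (s : Int × Int) (i : Int) => heuInner board (↑board.length) i s)
      = (fun (s : Int × Int) (i : Int) =>
          (s.1 + ((PySem.List.pyRange (i + 1) ↑board.length).map (cRow board i)).sum,
           s.2 + ((PySem.List.pyRange (i + 1) ↑board.length).map (cDia board i)).sum)) :=
    funext fun s => funext fun i => heuInner_eq board (↑board.length) i s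
  rw [houter, foldl_pair_add, PySem.List.pyRange_one]
  have hL : ((board.length : Int) - 0).toNat = board.length := by omega
  rw [hL, List.map_map, List.map_map]
  unfold rsRow rsDia
  have hrow : (List.range board.length).map
      ((fun i => ((PySem.List.pyRange (i + 1) ↑board.length).map (cRow board i)).sum)
        ∘ (fun (k : Nat) => (0 : Int) + ↑k))
      = (List.range board.length).map (fun i =>
          ((List.range (board.length - 1 - i)).map (fun k =>
            if board.getD i 0 = board.getD (i + 1 + k) 0 then (1 : Int) else 0)).sum) := by
    apply List.map_congr_left
    intro i _
    exact frow_term_eq board i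
  have hdia : (List.range board.length).map
      ((fun i => ((PySem.List.pyRange (i + 1) ↑board.length).map (cDia board i)).sum)
        ∘ (fun (k : Nat) => (0 : Int) + ↑k))
      = (List.range board.length).map (fun i =>
          ((List.range (board.length - 1 - i)).map (fun (k : Nat) =>
            if ((k : Int) + 1) = |board.getD i 0 - board.getD (i + 1 + k) 0| then (1 : Int) else 0)).sum) := by
    apply List.map_congr_left
    intro i _
    exact fdia_term_eq board i
  simp only [] at hrow hdia
  rw [hrow, hdia]
  ring

-- ===== B-side characterisation =====

lemma enumMapSub (t : List Int) : ∀ s,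
    (PySem.List.enumerate t s).map (fun p => p.2 - p.1) = diagA s t := by
  induction t with
  | nil => intro s; simp [PySem.List.enumerate_nil, diagA]
  | cons x r ih => intro s; simp [PySem.List.enumerate_cons, diagA, ih (s + 1)]

lemma enumMapAdd (t : List Int) : ∀ s,
    (PySem.List.enumerate t s).map (fun p => p.2 + p.1) = diagB s t := by
  induction t with
  | nil => intro s; simp [PySem.List.enumerate_nil, diagB]
  | cons x r ih => intro s; simp [PySem.List.enumerate_cons, diagB, ih (s + 1)]

lemma tables_eq (l : List (Int × Int)) :
    ∀ (a b c : PySem.Dict Int Int),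
    l.foldl
      (fun (s : PySem.Dict Int Int × PySem.Dict Int Int × PySem.Dict Int Int) (p : Int × Int) =>
        (s.1.insert p.2 (s.1.getD p.2 0 + 1),
         s.2.1.insert (p.2 - p.1) (s.2.1.getD (p.2 - p.1) 0 + 1),
         s.2.2.insert (p.2 + p.1) (s.2.2.getD (p.2 + p.1) 0 + 1))) (a, b, c)
    = ((l.map (fun p => p.2)).foldl (fun d v => d.insert v (d.getD v 0 + 1)) a,
       (l.map (fun p => p.2 - p.1)).foldl (fun d v => d.insert v (d.getD v 0 + 1)) b,
       (l.map (fun p => p.2 + p.1)).foldl (fun d v => d.insert v (d.getD v 0 + 1)) c) := by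
  induction l with
  | nil => intro a b c; rfl
  | cons p r ih => intro a b c; simp only [List.foldl_cons, List.map_cons, ih]

lemma c2_cast (c : Nat) :
    PySem.Int.floordiv ((c : Int) * ((c : Int) - 1)) 2 = ((c * (c - 1) / 2 : Nat) : Int) := by
  cases c with
  | zero => decide
  | succ d =>
    have h : ((d + 1 : Nat) : Int) * (((d + 1 : Nat) : Int) - 1) = (((d + 1) * d : Nat) : Int) := by
      push_cast; ring
    rw [h, show (2 : Int) = ((2 : Nat) : Int) from rfl, PySem.Int.floordiv_natCast]
    simp

lemma heuristicAlt_eq (board : List Int) :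
    heuristicAlt board = sumC2 board + sumC2 (diagA 0 board) + sumC2 (diagB 0 board) := by
  unfold heuristicAlt
  rw [tables_eq]
  have hsnd : (PySem.List.enumerate board).map (fun p => p.2) = board := by
    simp [PySem.List.map_snd_enumerate]
  rw [hsnd, enumMapSub board 0, enumMapAdd board 0]
  rw [PySem.Dict.foldl_insert_getD_add_one_eq_counter,
      PySem.Dict.foldl_insert_getD_add_one_eq_counter,
      PySem.Dict.foldl_insert_getD_add_one_eq_counter]
  rw [PySem.List.foldl_add]
  simp only [List.map_append, List.sum_append, PySem.Dict.values, PySem.Dict.items_counter,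
    List.map_map]
  simp only [sumC2]
  rw [zero_add]
  congr 1
  · congr 1
    · apply congrArg List.sum
      apply List.map_congr_left
      intro k _
      simp only [Function.comp_apply]
      exact c2_cast _
    · apply congrArg List.sum
      apply List.map_congr_left
      intro k _
      simp only [Function.comp_apply]
      exact c2_cast _
  · apply congrArg List.sum
    apply List.map_congr_left
    intro k _
    simp only [Function.comp_apply]
    exact c2_cast _

-- ===== the two ports' heuristics agree, and so do the scan loops =====

lemma pc_append_singleton (l : List Int) (x : Int) :
    pc (l ++ [x]) = pc l + (l.count x : Int) := by
  induction l with
  | nil => simp [pc]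
  | cons y t ih =>
    simp only [List.cons_append, pc, ih, List.count_append, List.count_cons]
    by_cases h : x = y
    · simp only [List.count_nil, beq_iff_eq, h]
      push_cast; ring
    · simp only [List.count_nil, beq_iff_eq, if_neg h, if_neg (Ne.symm h)]
      push_cast; ring

lemma sum_map_update (l : List Int) (f g : Int → Int) (x : Int)
    (hnd : l.Nodup) (hx : x ∈ l) (hfg : ∀ y ∈ l, y ≠ x → f y = g y) :
    (l.map f).sum = (l.map g).sum + f x - g x := by
  induction l with
  | nil => cases hx
  | cons y t ih =>
    rcases List.mem_cons.mp hx with rfl | hxt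
    · have hnotin : x ∉ t := (List.nodup_cons.mp hnd).1
      have : ∀ z ∈ t, f z = g z := fun z hz =>
        hfg z (List.mem_cons_of_mem _ hz) (fun e => hnotin (e ▸ hz))
      simp only [List.map_cons, List.sum_cons, List.map_congr_left this]
      ring
    · have hne : y ≠ x := fun e => ((List.nodup_cons.mp hnd).1 (e ▸ hxt))
      have := ih (List.nodup_cons.mp hnd).2 hxt
        (fun z hz => hfg z (List.mem_cons_of_mem _ hz))
      simp only [List.map_cons, List.sum_cons, this, hfg y (List.mem_cons_self) hne]
      ring

lemma c2_succ (c : Nat) : (c + 1) * ((c + 1) - 1) / 2 = c * (c - 1) / 2 + c := by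
  cases c with
  | zero => decide
  | succ d =>
    have h : (d + 1 + 1) * (d + 1 + 1 - 1) = (d + 1) * ((d + 1) - 1) + (d + 1) * 2 := by
      simp only [Nat.add_sub_cancel]; ring
    rw [h, Nat.add_mul_div_right _ _ (by norm_num : 0 < 2)]

lemma sumC2_eq_pc (xs : List Int) : sumC2 xs = pc xs := by
  induction xs using List.reverseRecOn with
  | nil => rfl
  | append_singleton l x ih =>
    rw [pc_append_singleton, ← ih]
    unfold sumC2
    have hof : PySem.Set.ofList (l ++ [x]) = (PySem.Set.ofList l).add x := by
      simp [PySem.Set.ofList, List.foldl_append]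
    by_cases hx : x ∈ l
    · have hadd : (PySem.Set.ofList l).add x = PySem.Set.ofList l := by
        unfold PySem.Set.add
        rw [if_pos (by simpa using (PySem.Set.mem_ofList l x).mpr hx)]
      rw [hof, hadd]
      have hcx : (l ++ [x]).count x = l.count x + 1 := by
        simp [List.count_append]
      have := sum_map_update (PySem.Set.ofList l)
        (fun k => (↑((l ++ [x]).count k * ((l ++ [x]).count k - 1) / 2) : Int))
        (fun k => (↑(l.count k * (l.count k - 1) / 2) : Int)) x
        (PySem.Set.nodup_ofList l) ((PySem.Set.mem_ofList l x).mpr hx)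
        (fun y _ hy => by
          have hcy : (l ++ [x]).count y = l.count y := by
            simp [List.count_append, Ne.symm hy]
          simp only [hcy])
      rw [this]
      simp only [hcx]
      rw [c2_succ]
      push_cast; ring
    · have hadd : (PySem.Set.ofList l).add x = PySem.Set.ofList l ++ [x] := by
        unfold PySem.Set.add
        rw [if_neg (by simpa using fun h => hx ((PySem.Set.mem_ofList l x).mp h))]
      rw [hof, hadd, List.map_append, List.sum_append]
      have hcount0 : l.count x = 0 := List.count_eq_zero_of_not_mem hx
      have hmap : (PySem.Set.ofList l).map
            (fun k => (↑((l ++ [x]).count k * ((l ++ [x]).count k - 1) / 2) : Int))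
          = (PySem.Set.ofList l).map
            (fun k => (↑(l.count k * (l.count k - 1) / 2) : Int)) := by
        apply List.map_congr_left
        intro y hy
        have hyx : y ≠ x := fun e => hx (e ▸ (PySem.Set.mem_ofList l y).mp hy)
        have hcy : (l ++ [x]).count y = l.count y := by
          simp [List.count_append, Ne.symm hyx]
        simp only [hcy]
      rw [hmap]
      simp [hcount0]

lemma heuristica_eq_alt (board : List Int) : heuristica board = heuristicAlt board := by
  rw [heuristica_eq_rs, heuristicAlt_eq, rsRow_eq_pc, rsDia_eq_pc,
    sumC2_eq_pc, sumC2_eq_pc, sumC2_eq_pc]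
  ring

lemma loop_eq (pop : List (List Int)) : ∀ (menor : Int) (best : List Int),
    foundLoop menor best pop = foundAltLoop (some (menor, best)) pop := by
  induction pop with
  | nil => intro menor best; rfl
  | cons ind rest ih =>
    intro menor best
    simp only [foundLoop, foundAltLoop, ← heuristica_eq_alt ind]
    by_cases h0 : heuristica ind = 0
    · simp [h0]
    · by_cases hle : heuristica ind ≤ menor <;> simp [h0, hle, ih]

-- ===== VERDICT (by name: the statement is the Claim_ definition above) =====
theorem foundSolution_spec : Claim_equal_foundSolution := by
  intro population _ hpre
  unfold Spec_foundSolution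
  match population with
  | [] => exact absurd rfl hpre
  | first :: rest =>
    show foundSolution (first :: rest) = foundSolution_alt (first :: rest)
    simp only [foundSolution, foundSolution_alt, foundLoop, foundAltLoop,
      ← heuristica_eq_alt first]
    by_cases h0 : heuristica first = 0
    · simp [h0]
    · simp [h0, loop_eq]
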